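-- pv_equiv track=rewrite | github.com/L3G0L4SSD/ERASMUS | Algorithm_projects/first_assign/partB.py | gusfield_z
-- ===== SOURCE A (Python) =====
-- def gusfield_z(text, pattern):
--     def compute_z(s):
--         z = [0] * len(s)
--         l, r, k = 0, 0, 0
--         for i in range(1, len(s)):
--             if i > r:
--                 l, r = i, i
--                 while r < len(s) and s[r] == s[r - l]:
--                     r += 1
--                 z[i] = r - l
--                 r -= 1
--             else:
--                 k = i - l
--                 if z[k] < r - i + 1:
--                     z[i] = z[k]
--                 else:
--                     l = i
--                     while r < len(s) and s[r] == s[r - l]: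
--                         r += 1
--                     z[i] = r - l
--                     r -= 1
--         return z
--
--     combined = pattern + '$' + text
--     z = compute_z(combined)
--     occurrences = [i - len(pattern) - 1 for i in range(len(pattern) + 1, len(z)) if z[i] == len(pattern)]
--     return occurrences
-- ===== SOURCE B (Python) =====
-- def gusfield_z(text, pattern):
--     m = len(pattern)
--     return [i for i in range(len(text) - m + 1) if text[i:i+m] == pattern]
-- ===== Notes on version B (the rewrite author's own statement) =====
-- stated objective: simpler
-- what changed: Replaces the Z-array over the sentinel-joined string pattern+'$'+text by a direct one-line window scan comparing each length-m slice of text with pattern, eliminating the sentinel and the Z-box machinery.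
-- intended difference: On an empty pattern, and on texts where an occurrence of the pattern is immediately followed by a '$' character (which collides with A's sentinel), A omits valid occurrence positions (and for the empty pattern also omits position len(text)), while B returns every position at which the pattern occurs, which is the intended result. — e.g. on gusfield_z("aa$b", "a"): A returns [0], B returns [0, 1]
import Mathlib
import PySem

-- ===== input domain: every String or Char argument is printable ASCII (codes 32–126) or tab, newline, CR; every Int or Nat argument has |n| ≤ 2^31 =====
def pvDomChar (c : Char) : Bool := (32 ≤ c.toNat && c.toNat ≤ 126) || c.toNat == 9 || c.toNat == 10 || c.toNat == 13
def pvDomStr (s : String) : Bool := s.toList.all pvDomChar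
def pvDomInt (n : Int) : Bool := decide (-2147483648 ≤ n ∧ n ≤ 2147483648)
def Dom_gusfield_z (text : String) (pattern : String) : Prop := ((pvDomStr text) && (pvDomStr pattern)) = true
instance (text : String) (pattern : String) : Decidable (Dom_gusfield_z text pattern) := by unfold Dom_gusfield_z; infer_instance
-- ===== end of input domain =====

-- B replaces A's Z-array over pattern+'$'+text by a direct slice-comparison scan (simpler);
-- return-value equivalence is proved outside D_gusfield_z, where A's sentinel makes it drop occurrences.

-- ===== PORT A =====
-- the inner `while r < len(s) and s[r] == s[r-l]: r += 1` loop; fuel (≥ len(s) - r) only makes it structural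
def pvExtend (fuel : Nat) (s : List Char) (l r : Nat) : Nat :=
  match fuel with
  | 0 => r
  | fuel + 1 =>
    if r < s.length ∧ s.getD r ' ' = s.getD (r - l) ' ' then pvExtend fuel s l (r + 1) else r

-- one iteration of `for i in range(1, len(s))` over the state (z, l, r); k = i - l is inlined
def pvZStep (s : List Char) (st : List Nat × Nat × Nat) (i : Nat) : List Nat × Nat × Nat :=
  if i > st.2.2 then
    (st.1.set i (pvExtend s.length s i i - i), i, pvExtend s.length s i i - 1)
  else
    if st.1.getD (i - st.2.1) 0 < st.2.2 - i + 1 then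
      (st.1.set i (st.1.getD (i - st.2.1) 0), st.2.1, st.2.2)
    else
      (st.1.set i (pvExtend s.length s i st.2.2 - i), i, pvExtend s.length s i st.2.2 - 1)

def pvComputeZ (s : List Char) : List Nat :=
  ((List.range' 1 (s.length - 1)).foldl (pvZStep s) (List.replicate s.length 0, 0, 0)).1

def gusfield_z (text : String) (pattern : String) : List Int :=
  let combined := pattern.toList ++ '$' :: text.toList
  let z := pvComputeZ combined
  ((PySem.List.pyRange ((pattern.length : Int) + 1) ((z.length : Int)) 1).filter
      (fun i => z.getD i.toNat 0 == pattern.length)).map (fun i => i - (pattern.length : Int) - 1)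

-- ===== PORT B =====
def gusfield_z_alt (text : String) (pattern : String) : List Int :=
  let m := pattern.length
  (PySem.List.pyRange 0 ((text.length : Int) - (m : Int) + 1) 1).filter
    (fun i => PySem.List.slice text.toList (some i) (some (i + (m : Int))) == pattern.toList)

-- ===== PRECONDITION & SPEC =====
-- On an empty pattern, and on texts where an occurrence of the pattern is immediately followed by
-- a '$' (colliding with A's sentinel), A omits valid occurrence positions (for the empty pattern
-- also position len(text)); B returns every position where the pattern occurs, the intended result.
-- the positions of '$' in the text, found by one scan
def pvDollarPositions (t : List Char) : List Nat :=
  (t.zipIdx.filter (fun ci => ci.1 = '$')).map (fun ci => ci.2)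

def D_gusfield_z (text : String) (pattern : String) : Prop :=
  pattern = "" ∨
    ∃ i ∈ pvDollarPositions text.toList,
      pattern.length ≤ i ∧
      (text.toList.drop (i - pattern.length)).take pattern.length = pattern.toList
instance (text : String) (pattern : String) : Decidable (D_gusfield_z text pattern) := by
  unfold D_gusfield_z; infer_instance

def Spec_gusfield_z (text : String) (pattern : String) (out : List Int) : Prop :=
  ¬ D_gusfield_z text pattern → out = gusfield_z_alt text pattern
instance (text : String) (pattern : String) (out : List Int) : Decidable (Spec_gusfield_z text pattern out) := by
  unfold Spec_gusfield_z; infer_instance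

def pvDiffWitness_gusfield_z : String × String := ("aa$b", "a")
def pvDiffWitnessOut_gusfield_z : (List Int) × (List Int) := ([0], [0, 1])

-- ===== CLAIM (what is proved, stated in full; the proofs are below) =====
def Claim_unchanged_gusfield_z : Prop := ∀ (text : String) (pattern : String), Dom_gusfield_z text pattern → Spec_gusfield_z text pattern (gusfield_z text pattern)
def Claim_changed_gusfield_z : Prop := Dom_gusfield_z (pvDiffWitness_gusfield_z.1) (pvDiffWitness_gusfield_z.2) ∧ D_gusfield_z (pvDiffWitness_gusfield_z.1) (pvDiffWitness_gusfield_z.2) ∧ gusfield_z (pvDiffWitness_gusfield_z.1) (pvDiffWitness_gusfield_z.2) = pvDiffWitnessOut_gusfield_z.1 ∧ gusfield_z_alt (pvDiffWitness_gusfield_z.1) (pvDiffWitness_gusfield_z.2) = pvDiffWitnessOut_gusfield_z.2 ∧ pvDiffWitnessOut_gusfield_z.1 ≠ pvDiffWitnessOut_gusfield_z.2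


-- ===== LEMMAS AND PROOFS =====

theorem mem_pvDollarPositions (t : List Char) (i : Nat) :
    i ∈ pvDollarPositions t ↔ i < t.length ∧ t.getD i ' ' = '$' := by
  unfold pvDollarPositions
  simp only [List.mem_map, List.mem_filter, decide_eq_true_eq]
  constructor
  · rintro ⟨⟨c, j⟩, ⟨hmem, hdol⟩, rfl⟩
    rw [List.mk_mem_zipIdx_iff_getElem?] at hmem
    have hj : j < t.length := by
      by_contra h
      rw [List.getElem?_eq_none (by omega)] at hmem
      simp at hmem
    refine ⟨hj, ?_⟩
    simp only at hdol
    rw [List.getD_eq_getElem?_getD, hmem, hdol]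
    rfl
  · rintro ⟨hi, hd⟩
    refine ⟨('$', i), ⟨?_, rfl⟩, rfl⟩
    rw [List.mk_mem_zipIdx_iff_getElem?]
    rw [List.getD_eq_getElem t ' ' hi] at hd
    rw [List.getElem?_eq_getElem hi, hd]

-- length of the longest common prefix of two character lists
def lcpN : List Char → List Char → Nat
  | a :: as, b :: bs => if a = b then lcpN as bs + 1 else 0
  | _, _ => 0

-- Z-value specification: length of the longest common prefix of s[i:] and s
def zsp (s : List Char) (i : Nat) : Nat := lcpN (s.drop i) s

theorem lcpN_nil_left (b : List Char) : lcpN [] b = 0 := by cases b <;> rfl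

theorem lcpN_le_left (a b : List Char) : lcpN a b ≤ a.length := by
  induction a generalizing b with
  | nil => simp [lcpN_nil_left]
  | cons x xs ih =>
    cases b with
    | nil => simp [lcpN]
    | cons y ys =>
      by_cases h : x = y
      · simp only [lcpN, if_pos h, List.length_cons]
        have := ih ys
        omega
      · simp [lcpN, h]

theorem lcpN_match (a b : List Char) (t : Nat) (ht : t < lcpN a b) :
    a.getD t ' ' = b.getD t ' ' := by
  induction a generalizing b t with
  | nil => simp [lcpN_nil_left] at ht
  | cons x xs ih =>
    cases b with
    | nil => simp [lcpN] at ht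
    | cons y ys =>
      simp only [lcpN] at ht
      split at ht
      · cases t with
        | zero => simpa using ‹x = y›
        | succ t' => simpa using ih ys t' (by omega)
      · omega

theorem lcpN_mismatch (a b : List Char) (h1 : lcpN a b < a.length) (h2 : lcpN a b < b.length) :
    a.getD (lcpN a b) ' ' ≠ b.getD (lcpN a b) ' ' := by
  induction a generalizing b with
  | nil => simp at h1
  | cons x xs ih =>
    cases b with
    | nil => simp at h2
    | cons y ys =>
      by_cases hxy : x = y
      · subst hxy
        simp only [lcpN, if_true, List.length_cons] at h1 h2
        simp only [lcpN, if_true, List.getD_cons_succ]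
        exact ih ys (by omega) (by omega)
      · simp only [lcpN, if_neg hxy, List.getD_cons_zero]
        exact hxy

theorem getD_drop (s : List Char) (l t : Nat) (d : Char) :
    (s.drop l).getD t d = s.getD (l + t) d := by
  simp [List.getD_eq_getElem?_getD, List.getElem?_drop]

theorem lcpN_eq_add_drop (a b : List Char) (k : Nat)
    (hm : ∀ t, t < k → a.getD t ' ' = b.getD t ' ')
    (ha : k ≤ a.length) (hb : k ≤ b.length) :
    lcpN a b = k + lcpN (a.drop k) (b.drop k) := by
  induction k generalizing a b with
  | zero => simp
  | succ k' ih =>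
    cases a with
    | nil => simp at ha
    | cons x xs =>
      cases b with
      | nil => simp at hb
      | cons y ys =>
        have h0 : x = y := by simpa using hm 0 (by omega)
        simp only [lcpN, if_pos h0, List.drop_succ_cons]
        have := ih xs ys (fun t ht => by simpa using hm (t + 1) (by omega))
          (by simpa using ha) (by simpa using hb)
        omega

theorem lcpN_eq_of (a b : List Char) (c : Nat)
    (hm : ∀ t, t < c → a.getD t ' ' = b.getD t ' ')
    (ha : c ≤ a.length) (hb : c ≤ b.length)
    (hstop : c = a.length ∨ c = b.length ∨ a.getD c ' ' ≠ b.getD c ' ') :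
    lcpN a b = c := by
  have hsplit := lcpN_eq_add_drop a b c hm ha hb
  have hz : lcpN (a.drop c) (b.drop c) = 0 := by
    rcases hstop with h | h | h
    · have : a.drop c = [] := by simp [h]
      simp [this, lcpN_nil_left]
    · have : b.drop c = [] := by simp [h]
      cases hd : a.drop c with
      | nil => simp [lcpN_nil_left]
      | cons x xs => simp [this, lcpN]
    · by_contra hne
      have h0 : 0 < lcpN (a.drop c) (b.drop c) := Nat.pos_of_ne_zero hne
      have := lcpN_match (a.drop c) (b.drop c) 0 h0
      rw [getD_drop, getD_drop] at this
      simp at this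
      exact h this
  omega

theorem zsp_le (s : List Char) (i : Nat) : zsp s i ≤ s.length - i := by
  have := lcpN_le_left (s.drop i) s
  simpa [zsp] using this

theorem zsp_match (s : List Char) (i t : Nat) (ht : t < zsp s i) :
    s.getD (i + t) ' ' = s.getD t ' ' := by
  have := lcpN_match (s.drop i) s t ht
  rwa [getD_drop] at this

theorem zsp_mismatch (s : List Char) (i : Nat) (hi : i + zsp s i < s.length) :
    s.getD (i + zsp s i) ' ' ≠ s.getD (zsp s i) ' ' := by
  have hz : zsp s i = lcpN (s.drop i) s := rfl
  rw [hz] at hi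
  have h1 : lcpN (s.drop i) s < (s.drop i).length := by
    rw [List.length_drop]; omega
  have h2 : lcpN (s.drop i) s < s.length := by omega
  have h := lcpN_mismatch (s.drop i) s h1 h2
  rw [getD_drop] at h
  rw [hz]
  exact h

theorem zsp_eq_of (s : List Char) (i c : Nat)
    (hm : ∀ t, t < c → s.getD (i + t) ' ' = s.getD t ' ')
    (hc : i + c ≤ s.length)
    (hstop : i + c = s.length ∨ s.getD (i + c) ' ' ≠ s.getD c ' ') :
    zsp s i = c := by
  apply lcpN_eq_of
  · intro t ht
    rw [getD_drop]
    exact hm t ht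
  · simp; omega
  · omega
  · rcases hstop with h | h
    · left; simp; omega
    · right; right; rw [getD_drop]; exact h

-- the extend loop computes r plus the lcp of s[r:] and s[r-l:]
theorem pvExtend_eq (s : List Char) (l : Nat) :
    ∀ (fuel r : Nat), l ≤ r → s.length - r ≤ fuel →
    pvExtend fuel s l r = r + lcpN (s.drop r) (s.drop (r - l)) := by
  intro fuel
  induction fuel with
  | zero =>
    intro r hl hf
    have : s.drop r = [] := by simp; omega
    simp [pvExtend, this, lcpN_nil_left]
  | succ f ih =>
    intro r hl hf
    rw [pvExtend]
    split
    · next hcond =>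
      obtain ⟨hr, heq⟩ := hcond
      rw [ih (r + 1) (by omega) (by omega)]
      have hd1 : s.drop r = s.getD r ' ' :: s.drop (r + 1) := by
        rw [List.getD_eq_getElem s ' ' hr]
        exact List.drop_eq_getElem_cons hr
      have hrl : r - l < s.length := by omega
      have hd2 : s.drop (r - l) = s.getD (r - l) ' ' :: s.drop (r - l + 1) := by
        rw [List.getD_eq_getElem s ' ' hrl]
        exact List.drop_eq_getElem_cons hrl
      rw [hd1, hd2]
      simp only [lcpN, if_pos heq]
      have : r + 1 - l = r - l + 1 := by omega
      rw [this]
      omega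
    · next hcond =>
      by_cases hr : r < s.length
      · have hne : s.getD r ' ' ≠ s.getD (r - l) ' ' := by
          intro h; exact hcond ⟨hr, h⟩
        have hrl : r - l < s.length := by omega
        have hd1 : s.drop r = s.getD r ' ' :: s.drop (r + 1) := by
          rw [List.getD_eq_getElem s ' ' hr]; exact List.drop_eq_getElem_cons hr
        have hd2 : s.drop (r - l) = s.getD (r - l) ' ' :: s.drop (r - l + 1) := by
          rw [List.getD_eq_getElem s ' ' hrl]; exact List.drop_eq_getElem_cons hrl
        rw [hd1, hd2]
        simp only [lcpN, if_neg hne]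
        omega
      · have : s.drop r = [] := by simp; omega
        simp [this, lcpN_nil_left]

-- the extend loop, started inside a verified match region, lands on l + Z(l)
theorem pvExtend_zsp (s : List Char) (l r : Nat) (hl : l ≤ r) (hr : r ≤ s.length)
    (hm : ∀ t, l + t < r → s.getD (l + t) ' ' = s.getD t ' ') :
    pvExtend s.length s l r = l + zsp s l := by
  rw [pvExtend_eq s l s.length r hl (by omega)]
  have hz : zsp s l = (r - l) + lcpN ((s.drop l).drop (r - l)) (s.drop (r - l)) := by
    apply lcpN_eq_add_drop
    · intro t ht
      rw [getD_drop]
      exact hm t (by omega)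
    · simp; omega
    · omega
  rw [List.drop_drop, show l + (r - l) = r from by omega] at hz
  omega

-- loop invariant for the Z-algorithm main loop
def ZInv (s : List Char) (i : Nat) (st : List Nat × Nat × Nat) : Prop :=
  st.1.length = s.length ∧ st.2.1 < i ∧ st.2.2 < s.length ∧ st.2.1 ≤ st.2.2 + 1 ∧
  (st.2.1 = 0 → st.2.2 + 1 ≤ i) ∧
  (∀ t, st.2.1 + t ≤ st.2.2 → s.getD (st.2.1 + t) ' ' = s.getD t ' ') ∧
  (∀ j, 1 ≤ j → j < i → st.1.getD j 0 = zsp s j) ∧ st.1.getD 0 0 = 0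

theorem getD_set_self (z : List Nat) (i : Nat) (v : Nat) (hi : i < z.length) :
    (z.set i v).getD i 0 = v := by
  simp [List.getD_eq_getElem?_getD, hi]

theorem getD_set_ne (z : List Nat) (i j : Nat) (v : Nat) (hij : i ≠ j) :
    (z.set i v).getD j 0 = z.getD j 0 := by
  simp [List.getD_eq_getElem?_getD, List.getElem?_set_ne hij]

-- common conclusion of the two extending branches
theorem zbox_state_inv (s : List Char) (i : Nat) (z : List Nat)
    (hlen : z.length = s.length) (hz0 : z.getD 0 0 = 0)
    (hzj : ∀ j, 1 ≤ j → j < i → z.getD j 0 = zsp s j) (h1 : 1 ≤ i) (hi : i < s.length) :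
    ZInv s (i + 1) (z.set i (i + zsp s i - i), i, i + zsp s i - 1) := by
  have hle := zsp_le s i
  have hid : i + zsp s i - i = zsp s i := by omega
  rw [hid]
  unfold ZInv
  dsimp only
  refine ⟨by simp [hlen], by omega, by omega, by omega, by omega, ?_, ?_, ?_⟩
  · intro t ht
    exact zsp_match s i t (by omega)
  · intro j hj1 hji
    by_cases hji' : j = i
    · subst hji'
      rw [getD_set_self z j (zsp s j) (by omega)]
    · rw [getD_set_ne z i j (zsp s i) (fun h => hji' h.symm)]
      exact hzj j hj1 (by omega)
  · rw [getD_set_ne z i 0 _ (by omega)]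
    exact hz0

theorem pvZStep_inv (s : List Char) (i : Nat) (st : List Nat × Nat × Nat)
    (hinv : ZInv s i st) (h1 : 1 ≤ i) (hi : i < s.length) :
    ZInv s (i + 1) (pvZStep s st i) := by
  obtain ⟨z, l, r⟩ := st
  obtain ⟨hlen, hli, hrn, hlr, hl0, hbox, hzj, hz0⟩ := hinv
  dsimp only at hlen hli hrn hlr hl0 hbox hzj hz0
  rw [pvZStep]
  dsimp only
  by_cases hir : i > r
  · rw [if_pos hir]
    have hext : pvExtend s.length s i i = i + zsp s i :=
      pvExtend_zsp s i i le_rfl (by omega) (fun t ht => absurd ht (by omega))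
    rw [hext]
    exact zbox_state_inv s i z hlen hz0 hzj h1 hi
  · rw [if_neg hir]
    have hir2 : i ≤ r := by omega
    have hl1 : 1 ≤ l := by
      by_contra h
      have : l = 0 := by omega
      have := hl0 this
      omega
    have hk1 : 1 ≤ i - l := by omega
    have hki : i - l < i := by omega
    have hzk : z.getD (i - l) 0 = zsp s (i - l) := hzj (i - l) hk1 hki
    have hzkle := zsp_le s (i - l)
    rw [hzk]
    by_cases hcase : zsp s (i - l) < r - i + 1
    · rw [if_pos hcase]
      have hzi : zsp s i = zsp s (i - l) := by
        apply zsp_eq_of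
        · intro t ht
          have hb := hbox ((i - l) + t) (by omega)
          rw [show l + ((i - l) + t) = i + t from by omega] at hb
          rw [hb]
          exact zsp_match s (i - l) t ht
        · omega
        · right
          have hb := hbox ((i - l) + zsp s (i - l)) (by omega)
          rw [show l + ((i - l) + zsp s (i - l)) = i + zsp s (i - l) from by omega] at hb
          rw [hb]
          exact zsp_mismatch s (i - l) (by omega)
      unfold ZInv
      dsimp only
      refine ⟨by simp [hlen], by omega, hrn, hlr, by omega, hbox, ?_, ?_⟩
      · intro j hj1 hji
        by_cases hji' : j = i
        · subst hji'
          rw [getD_set_self z j _ (by omega), hzi]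
        · rw [getD_set_ne z i j _ (fun h => hji' h.symm)]
          exact hzj j hj1 (by omega)
      · rw [getD_set_ne z i 0 _ (by omega)]
        exact hz0
    · rw [if_neg hcase]
      have hext : pvExtend s.length s i r = i + zsp s i := by
        apply pvExtend_zsp s i r hir2 (by omega)
        intro t ht
        have hb := hbox ((i - l) + t) (by omega)
        rw [show l + ((i - l) + t) = i + t from by omega] at hb
        rw [hb]
        exact zsp_match s (i - l) t (by omega)
      rw [hext]
      exact zbox_state_inv s i z hlen hz0 hzj h1 hi

theorem zloop_inv (s : List Char) :
    ∀ (cnt i : Nat) (st : List Nat × Nat × Nat), ZInv s i st → 1 ≤ i → i + cnt ≤ s.length →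
    ZInv s (i + cnt) ((List.range' i cnt).foldl (pvZStep s) st) := by
  intro cnt
  induction cnt with
  | zero => intro i st h _ _; simpa using h
  | succ c ih =>
    intro i st h h1 hle
    rw [List.range'_succ]
    simp only [List.foldl_cons]
    have := ih (i + 1) (pvZStep s st i) (pvZStep_inv s i st h h1 (by omega)) (by omega) (by omega)
    have heq : i + (c + 1) = i + 1 + c := by omega
    rw [heq]
    exact this

theorem computeZ_inv (s : List Char) (hs : 1 ≤ s.length) :
    ZInv s s.length (((List.range' 1 (s.length - 1)).foldl (pvZStep s) (List.replicate s.length 0, 0, 0))) := by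
  have h0 : ZInv s 1 (List.replicate s.length 0, 0, 0) := by
    unfold ZInv
    dsimp only
    refine ⟨by simp, by omega, by omega, by omega, by omega, ?_, by omega, ?_⟩
    · intro t ht
      have ht0 : t = 0 := by omega
      simp [ht0]
    · simp only [List.getD_eq_getElem?_getD, List.getElem?_replicate]
      split <;> simp
  have := zloop_inv s (s.length - 1) 1 _ h0 (by omega) (by omega)
  have heq : 1 + (s.length - 1) = s.length := by omega
  rwa [heq] at this

theorem computeZ_getD (s : List Char) (j : Nat) (h1 : 1 ≤ j) (hj : j < s.length) :
    (pvComputeZ s).getD j 0 = zsp s j := by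
  have hs : 1 ≤ s.length := by omega
  exact (computeZ_inv s hs).2.2.2.2.2.2.1 j h1 hj

theorem computeZ_length (s : List Char) : (pvComputeZ s).length = s.length := by
  by_cases hs : 1 ≤ s.length
  · exact (computeZ_inv s hs).1
  · have : s.length = 0 := by omega
    simp [pvComputeZ, this]

-- ---- structure of the combined string s = pattern ++ '$' ++ text ----

theorem sF_len (p t : List Char) : (p ++ '$' :: t).length = p.length + 1 + t.length := by
  simp only [List.length_append, List.length_cons]
  omega

theorem sF_getD_lt (p t : List Char) (j : Nat) (hj : j < p.length) :
    (p ++ '$' :: t).getD j ' ' = p.getD j ' ' := by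
  simp [List.getD_eq_getElem?_getD, List.getElem?_append_left hj]

theorem sF_getD_m (p t : List Char) : (p ++ '$' :: t).getD p.length ' ' = '$' := by
  simp [List.getD_eq_getElem?_getD]

theorem sF_drop (p t : List Char) (k : Nat) :
    (p ++ '$' :: t).drop (p.length + 1 + k) = t.drop k := by
  rw [show p.length + 1 + k = p.length + (1 + k) from by omega]
  rw [List.drop_length_add_append]
  rw [show 1 + k = k + 1 from by omega]
  simp

theorem sF_getD_ge (p t : List Char) (k : Nat) :
    (p ++ '$' :: t).getD (p.length + 1 + k) ' ' = t.getD k ' ' := by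
  calc (p ++ '$' :: t).getD (p.length + 1 + k) ' '
      = (p ++ '$' :: t).getD (p.length + 1 + k + 0) ' ' := by simp
    _ = ((p ++ '$' :: t).drop (p.length + 1 + k)).getD 0 ' ' := (getD_drop _ _ _ _).symm
    _ = (t.drop k).getD 0 ' ' := by rw [sF_drop]
    _ = t.getD (k + 0) ' ' := getD_drop _ _ _ _
    _ = t.getD k ' ' := by simp

-- ---- slice equality as a pointwise condition ----

theorem take_eq_iff (xs p : List Char) :
    xs.take p.length = p ↔ p.length ≤ xs.length ∧ ∀ tt, tt < p.length → xs.getD tt ' ' = p.getD tt ' ' := by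
  induction p generalizing xs with
  | nil => simp
  | cons c cs ih =>
    cases xs with
    | nil => simp
    | cons x xs' =>
      rw [List.length_cons, List.take_succ_cons]
      constructor
      · intro h
        injection h with h1 h2
        have hih := (ih xs').mp h2
        refine ⟨by simp only [List.length_cons]; omega, ?_⟩
        intro tt htt
        cases tt with
        | zero => simpa using h1
        | succ tt' => simpa using hih.2 tt' (by omega)
      · rintro ⟨hlen, hall⟩
        have h0 : x = c := by simpa using hall 0 (by omega)
        have h2 : xs'.take cs.length = cs := (ih xs').mpr
          ⟨by simp only [List.length_cons] at hlen; omega,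
           fun tt htt => by simpa using hall (tt + 1) (by omega)⟩
        rw [h0, h2]

theorem occ_le (t p : List Char) (k : Nat) (hp : 1 ≤ p.length)
    (h : (t.drop k).take p.length = p) : k + p.length ≤ t.length := by
  have h2 := ((take_eq_iff (t.drop k) p).mp h).1
  rw [List.length_drop] at h2
  omega

-- ---- the Z-value at a text position equals m exactly on occurrences (no '$' collision) ----

theorem zsp_occ (p t : List Char)
    (hDo : ∀ j, j < t.length → (t.drop j).take p.length = p →
      j + p.length < t.length → t.getD (j + p.length) ' ' ≠ '$')
    (k : Nat) (hk : k < t.length) :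
    zsp (p ++ '$' :: t) (p.length + 1 + k) = p.length ↔ (t.drop k).take p.length = p := by
  have hslen := sF_len p t
  constructor
  · intro h
    have hle : zsp (p ++ '$' :: t) (p.length + 1 + k) ≤ (p ++ '$' :: t).length - (p.length + 1 + k) :=
      zsp_le _ _
    rw [h, hslen] at hle
    apply (take_eq_iff (t.drop k) p).mpr
    refine ⟨by rw [List.length_drop]; omega, ?_⟩
    intro tt htt
    have hm := zsp_match (p ++ '$' :: t) (p.length + 1 + k) tt (by omega)
    rw [show p.length + 1 + k + tt = p.length + 1 + (k + tt) from by omega] at hm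
    rw [sF_getD_ge, sF_getD_lt p t tt htt] at hm
    rw [getD_drop]
    exact hm
  · intro h
    obtain ⟨hlen2, hmatch⟩ := (take_eq_iff (t.drop k) p).mp h
    rw [List.length_drop] at hlen2
    apply zsp_eq_of
    · intro tt htt
      rw [show p.length + 1 + k + tt = p.length + 1 + (k + tt) from by omega, sF_getD_ge,
        sF_getD_lt p t tt htt]
      have := hmatch tt htt
      rwa [getD_drop] at this
    · omega
    · by_cases hend : k + p.length = t.length
      · left
        omega
      · right
        have hne := hDo k hk h (by omega)
        rw [show p.length + 1 + k + p.length = p.length + 1 + (k + p.length) from by omega,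
          sF_getD_ge, sF_getD_m]
        exact hne

-- ---- list-level equality of the two ports' bodies ----

theorem lists_main (p t : List Char) (hp : 1 ≤ p.length)
    (hDo : ∀ j, j < t.length → (t.drop j).take p.length = p →
      j + p.length < t.length → t.getD (j + p.length) ' ' ≠ '$') :
    ((PySem.List.pyRange ((p.length : Int) + 1) (((pvComputeZ (p ++ '$' :: t)).length : Nat) : Int) 1).filter
        (fun i => (pvComputeZ (p ++ '$' :: t)).getD i.toNat 0 == p.length)).map
      (fun i => i - (p.length : Int) - 1)
    = (PySem.List.pyRange 0 ((t.length : Int) - (p.length : Int) + 1) 1).filter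
        (fun i => PySem.List.slice t (some i) (some (i + (p.length : Int))) == p) := by
  rw [computeZ_length, sF_len]
  rw [show ((p.length + 1 + t.length : Nat) : Int) = ((p.length : Int) + 1) + (t.length : Int) from by
    push_cast; ring]
  rw [PySem.List.pyRange_one]
  rw [show (((p.length : Int) + 1) + (t.length : Int) - ((p.length : Int) + 1)).toNat = t.length from by
    omega]
  rw [List.filter_map, List.map_map]
  have hstep1 : (List.range t.length).filter
      ((fun i : Int => (pvComputeZ (p ++ '$' :: t)).getD i.toNat 0 == p.length) ∘
        fun k : Nat => (p.length : Int) + 1 + (k : Int))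
      = (List.range t.length).filter (fun k : Nat => decide ((t.drop k).take p.length = p)) :=
    List.filter_congr (by
      intro k hk
      rw [List.mem_range] at hk
      simp only [Function.comp_apply]
      rw [show ((p.length : Int) + 1 + (k : Int)).toNat = p.length + 1 + k from by omega]
      rw [computeZ_getD (p ++ '$' :: t) (p.length + 1 + k) (by omega) (by rw [sF_len]; omega)]
      rw [Bool.eq_iff_iff]
      simp only [beq_iff_eq, decide_eq_true_eq]
      exact zsp_occ p t hDo k hk)
  rw [hstep1]
  have hstep2 : (List.filter (fun k : Nat => decide ((t.drop k).take p.length = p))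
        (List.range t.length)).map
      ((fun i : Int => i - (p.length : Int) - 1) ∘ fun k : Nat => (p.length : Int) + 1 + (k : Int))
      = (List.filter (fun k : Nat => decide ((t.drop k).take p.length = p))
        (List.range t.length)).map (fun k : Nat => (k : Int)) :=
    List.map_congr_left (by
      intro k hk
      simp only [Function.comp_apply]
      ring)
  rw [hstep2]
  by_cases hc : p.length ≤ t.length
  · rw [show (t.length : Int) - (p.length : Int) + 1 = ((t.length - p.length + 1 : Nat) : Int) from by
      omega]
    rw [PySem.List.pyRange_one]
    rw [show (((t.length - p.length + 1 : Nat) : Int) - 0).toNat = t.length - p.length + 1 from by omega]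
    rw [List.filter_map]
    have hstep3 : (List.range (t.length - p.length + 1)).filter
        ((fun i : Int => PySem.List.slice t (some i) (some (i + (p.length : Int))) == p) ∘
          fun k : Nat => (0 : Int) + (k : Int))
        = (List.range (t.length - p.length + 1)).filter
            (fun k : Nat => decide ((t.drop k).take p.length = p)) :=
      List.filter_congr (by
        intro k hk
        simp only [Function.comp_apply]
        rw [show (0 : Int) + (k : Int) = ((k : Nat) : Int) from by ring]
        rw [PySem.List.slice_natCast_add]
        rw [Bool.eq_iff_iff]
        simp only [beq_iff_eq, decide_eq_true_eq])
    rw [hstep3]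
    have hstep4 : (List.filter (fun k : Nat => decide ((t.drop k).take p.length = p))
          (List.range (t.length - p.length + 1))).map (fun k : Nat => (0 : Int) + (k : Int))
        = (List.filter (fun k : Nat => decide ((t.drop k).take p.length = p))
          (List.range (t.length - p.length + 1))).map (fun k : Nat => (k : Int)) :=
      List.map_congr_left (by
        intro k hk
        ring)
    rw [hstep4]
    rw [show List.range t.length = List.range (t.length - p.length + 1) ++
        (List.range (p.length - 1)).map (fun x => t.length - p.length + 1 + x) from by
      rw [← List.range_add]
      congr 1
      omega]
    rw [List.filter_append]
    have hnil : ((List.range (p.length - 1)).map (fun x => t.length - p.length + 1 + x)).filter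
        (fun k : Nat => decide ((t.drop k).take p.length = p)) = [] :=
      List.filter_eq_nil_iff.mpr (by
        intro a ha hocc
        rw [List.mem_map] at ha
        obtain ⟨j, hj, rfl⟩ := ha
        rw [decide_eq_true_eq] at hocc
        have := occ_le t p _ hp hocc
        omega)
    rw [hnil, List.append_nil]
  · rw [PySem.List.pyRange_one_eq_nil (by omega)]
    have hnilA : (List.range t.length).filter
        (fun k : Nat => decide ((t.drop k).take p.length = p)) = [] :=
      List.filter_eq_nil_iff.mpr (by
        intro a ha hocc
        rw [decide_eq_true_eq] at hocc
        have := occ_le t p a hp hocc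
        omega)
    rw [hnilA]
    simp

-- ===== VERDICT (by name: the statement is the Claim_ definition above) =====
theorem gusfield_z_spec : Claim_unchanged_gusfield_z := by
  intro text pattern _ hD
  unfold D_gusfield_z at hD
  rw [not_or] at hD
  obtain ⟨hDe, hDo⟩ := hD
  have hp : 1 ≤ pattern.toList.length := by
    have hne : pattern.toList ≠ [] := by simpa using hDe
    cases hl : pattern.toList with
    | nil => exact absurd hl hne
    | cons a l => simp
  have hDo' : ∀ j, j < text.toList.length → (text.toList.drop j).take pattern.toList.length = pattern.toList →
      j + pattern.toList.length < text.toList.length → text.toList.getD (j + pattern.toList.length) ' ' ≠ '$' := by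
    intro j hj hocc hlt hEq
    refine hDo ⟨j + pattern.toList.length, (mem_pvDollarPositions _ _).mpr ⟨hlt, hEq⟩, by show pattern.toList.length ≤ j + pattern.toList.length; omega, ?_⟩
    show (text.toList.drop (j + pattern.toList.length - pattern.toList.length)).take
        pattern.toList.length = pattern.toList
    rw [Nat.add_sub_cancel]
    exact hocc
  show gusfield_z text pattern = gusfield_z_alt text pattern
  unfold gusfield_z gusfield_z_alt
  exact lists_main pattern.toList text.toList hp hDo' 

theorem gusfield_z_changed : Claim_changed_gusfield_z := by
  unfold Claim_changed_gusfield_z; decide
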